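-- pv_equiv track=rewrite | github.com/VUzan-bio/saber | saber/candidates/filters.py | _max_self_complement
-- ===== SOURCE A (Python) =====
-- def _max_self_complement(seq: str) -> int:
--     """Find the longest stretch where a subsequence is complementary
--     to another subsequence (potential for self-folding / dimerization).
--
--     Uses a simple O(n²) approach: for each pair of positions,
--     check how long the complementary stretch extends.
--     """
--     complement = {"A": "T", "T": "A", "G": "C", "C": "G"}
--     n = len(seq)
--     max_len = 0
--
--     for i in range(n):
--         for j in range(i + 4, n):  # minimum gap of 4 for hairpin loop
--             k = 0
--             while (
--                 i + k < j - k
--                 and j + k < n  # Note: j scans forward, i scans forward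
--                 and complement.get(seq[i + k], "") == seq[j - k]
--             ):
--                 k += 1
--             max_len = max(max_len, k)
--
--     return max_len
-- ===== SOURCE B (Python) =====
-- def _max_self_complement(seq: str) -> int:
--     """O(n^2) re-implementation: group index pairs by anti-diagonal d = i + j.
--     One backward pass per diagonal maintains the complementary match-run
--     length; the two monotone while-loop caps (hairpin crossing point and the
--     j + k < n bound) are applied in closed form, and since the candidate never
--     exceeds the run length, pairs with run <= best are skipped outright."""
--     complement = {"A": "T", "T": "A", "G": "C", "C": "G"}
--     n = len(seq)
--     comp = [complement.get(ch, "") for ch in seq]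
--     best = 0
--     for d in range(4, 2 * n - 5):
--         lo = max(0, d - n + 1)
--         hi = min(n - 1, d)
--         run = 0
--         for i in range(hi, lo - 1, -1):
--             if comp[i] == seq[d - i]:
--                 run += 1
--                 j = d - i
--                 if run > best and j >= i + 4:
--                     cand = min(run, (j - i + 1) // 2, n - j)
--                     if cand > best:
--                         best = cand
--             else:
--                 run = 0
--     return best
-- ===== Notes on version B (the rewrite author's own statement) =====
-- stated objective: faster
-- what changed: Replaces A's per-pair while-loop scan (O(n^3) worst case) by one backward pass per anti-diagonal d=i+j that maintains the complementary run length, applying the two loop caps (crossing point and j+k<n) in closed form.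
import Mathlib
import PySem

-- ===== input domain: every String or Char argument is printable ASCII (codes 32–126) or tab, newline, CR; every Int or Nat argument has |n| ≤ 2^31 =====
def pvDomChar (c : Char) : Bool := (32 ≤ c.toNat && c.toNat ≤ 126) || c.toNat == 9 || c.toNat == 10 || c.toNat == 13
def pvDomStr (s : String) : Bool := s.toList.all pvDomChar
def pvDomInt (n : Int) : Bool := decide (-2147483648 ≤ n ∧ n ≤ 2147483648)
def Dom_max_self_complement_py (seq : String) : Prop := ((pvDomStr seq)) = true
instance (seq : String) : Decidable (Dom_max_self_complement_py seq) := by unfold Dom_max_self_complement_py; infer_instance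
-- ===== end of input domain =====

-- B groups position pairs by anti-diagonal d = i + j and replaces A's inner while loop by a
-- run-length recurrence plus two closed-form caps: O(n^2) instead of O(n^3). Same return value.

-- ===== PORT A =====
-- the module-level complement dict {"A": "T", "T": "A", "G": "C", "C": "G"} (shared by both Pythons)
def pvComplement : PySem.Dict Char Char :=
  ((((PySem.Dict.empty).insert 'A' 'T').insert 'T' 'A').insert 'G' 'C').insert 'C' 'G'

-- complement.get(seq[a], "") == seq[b]  (the "" default never equals a 1-char string, hence none ↦ false)
def pvMatch (s : List Char) (a b : Int) : Bool :=
  match PySem.Dict.get? pvComplement (PySem.List.pyGetD s a ' ') with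
  | some c => c == PySem.List.pyGetD s b ' '
  | none => false

-- A's inner while loop (k increments while the three conditions hold)
def pvWhileK (s : List Char) (n i j k : Int) : Int :=
  if h : i + k < j - k ∧ j + k < n ∧ pvMatch s (i + k) (j - k) = true
  then pvWhileK s n i j (k + 1)
  else k
termination_by (j - k - (i + k)).toNat
decreasing_by
  have := h.1; omega

def max_self_complement_py (seq : String) : Int :=
  let s := seq.toList
  let n : Int := s.length
  (PySem.List.pyRange 0 n 1).foldl (fun maxLen i =>
    (PySem.List.pyRange (i + 4) n 1).foldl (fun acc j =>
      max acc (pvWhileK s n i j 0)) maxLen) 0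

-- ===== PORT B =====
-- comp[i] == seq[j]  (comp holds complement.get(ch, ""); "" never equals a 1-char string, hence none ↦ false)
def pvMatchComp (comp : List (Option Char)) (s : List Char) (i j : Int) : Bool :=
  match PySem.List.pyGetD comp i none with
  | some c => c == PySem.List.pyGetD s j ' '
  | none => false

def max_self_complement_py_alt (seq : String) : Int :=
  let s := seq.toList
  let n : Int := s.length
  let comp : List (Option Char) := s.map (fun ch => PySem.Dict.get? pvComplement ch)
  (PySem.List.pyRange 4 (2 * n - 5) 1).foldl (fun best d =>
    let lo := max 0 (d - n + 1)
    let hi := min (n - 1) d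
    ((PySem.List.pyRange hi (lo - 1) (-1)).foldl (fun st i =>
      if pvMatchComp comp s i (d - i) then
        let run := st.1 + 1
        let j := d - i
        let best' := if st.2 < run ∧ i + 4 ≤ j then
            (let cand := min (min run (PySem.Int.floordiv (j - i + 1) 2)) (n - j)
             if st.2 < cand then cand else st.2)
          else st.2
        (run, best')
      else ((0 : Int), st.2)) ((0 : Int), best)).2) 0

-- ===== PRECONDITION & SPEC =====
def Spec_max_self_complement_py (seq : String) (out : Int) : Prop := out = max_self_complement_py_alt seq
instance (seq : String) (out : Int) : Decidable (Spec_max_self_complement_py seq out) := by unfold Spec_max_self_complement_py; infer_instance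

-- ===== CLAIM (what is proved, stated in full; the proofs are below) =====
def Claim_equal_max_self_complement_py : Prop := ∀ (seq : String), Dom_max_self_complement_py seq → Spec_max_self_complement_py seq (max_self_complement_py seq)

-- ===== LEMMAS AND PROOFS =====

-- run length along the anti-diagonal d, from index i upward, stopping above hi
def pvRd (s : List Char) (d hi i : Int) : Int :=
  if _h : i ≤ hi then (if pvMatch s i (d - i) then pvRd s d hi (i + 1) + 1 else 0) else 0
termination_by (hi + 1 - i).toNat

lemma pvRd_nonneg (s : List Char) (d hi i : Int) : 0 ≤ pvRd s d hi i := by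
  fun_induction pvRd <;> omega

-- unfolding equations for pvRd
lemma pvRd_of_le (s : List Char) (d hi i : Int) (h : i ≤ hi) :
    pvRd s d hi i = if pvMatch s i (d - i) then pvRd s d hi (i + 1) + 1 else 0 := by
  rw [pvRd]; simp [h]

lemma pvRd_of_gt (s : List Char) (d hi i : Int) (h : hi < i) : pvRd s d hi i = 0 := by
  rw [pvRd]; simp [show ¬ i ≤ hi by omega]

lemma pvRd_of_not_match (s : List Char) (d hi i : Int) (h : pvMatch s i (d - i) = false) :
    pvRd s d hi i = 0 := by
  rw [pvRd]; split
  · simp [h]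
  · rfl

-- crux: A's while-loop value is the min of the diagonal run length and the two monotone caps
lemma pvWhileK_min3 (s : List Char) (n i j k c : Int)
    (hi0 : 0 ≤ i) (hjn : j < n) (hk : 0 ≤ k)
    (hc1 : j - i ≤ 2 * c) (hc2 : 2 * c ≤ j - i + 1)
    (hkc : k ≤ c) (hkn : k ≤ n - j) :
    pvWhileK s n i j k
      = k + min (min (pvRd s (i + j) (min (n - 1) (i + j)) (i + k)) (c - k)) (n - j - k) := by
  have hRd : ∀ a : Int, 0 ≤ pvRd s (i + j) (min (n - 1) (i + j)) a := fun a => pvRd_nonneg ..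
  generalize hm : (c - k).toNat = m
  induction m generalizing k with
  | zero =>
    -- k = c: the crossing cap is exhausted, the while condition i+k < j-k fails
    have hkc' : k = c := by omega
    rw [pvWhileK]
    have hcond : ¬ (i + k < j - k ∧ j + k < n ∧ pvMatch s (i + k) (j - k) = true) := by
      intro ⟨h1, _, _⟩; omega
    rw [dif_neg hcond]
    have := hRd (i + k)
    omega
  | succ m ih =>
    rw [pvWhileK]
    by_cases hcond : i + k < j - k ∧ j + k < n ∧ pvMatch s (i + k) (j - k) = true
    · rw [dif_pos hcond]
      obtain ⟨h1, h2, h3⟩ := hcond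
      have hkltc : k < c := by omega
      have hstep : pvRd s (i + j) (min (n - 1) (i + j)) (i + k)
          = pvRd s (i + j) (min (n - 1) (i + j)) (i + k + 1) + 1 := by
        rw [pvRd_of_le]
        · have : i + j - (i + k) = j - k := by ring
          rw [this, if_pos h3]
        · omega
      have ih' := ih (k + 1) (by omega) (by omega) (by omega) (by omega)
      have : i + (k + 1) = i + k + 1 := by ring
      rw [this] at ih'
      rw [ih', hstep]
      have := hRd (i + k + 1)
      omega
    · rw [dif_neg hcond]
      -- one of the three conditions fails; the corresponding min argument is ≤ 0 at k
      rcases Decidable.not_and_iff_or_not.mp hcond with h1 | h23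
      · have := hRd (i + k); omega
      · rcases Decidable.not_and_iff_or_not.mp h23 with h2 | h3
        · have := hRd (i + k); omega
        · have hz : pvRd s (i + j) (min (n - 1) (i + j)) (i + k) = 0 := by
            apply pvRd_of_not_match
            have : i + j - (i + k) = j - k := by ring
            rw [this]
            simpa using h3
          omega

-- generic facts about monotone folds
lemma pvFoldl_ge_init {α : Type} (step : Int → α → Int) (h : ∀ a x, a ≤ step a x) :
    ∀ (l : List α) (init : Int), init ≤ l.foldl step init := by
  intro l
  induction l with
  | nil => intro init; simp
  | cons y ys ih => intro init; simpa using le_trans (h init y) (ih (step init y))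

lemma pvFoldl_le {α : Type} (step : Int → α → Int) (c : Int) :
    ∀ (l : List α) (init : Int), (∀ a x, x ∈ l → a ≤ c → step a x ≤ c) → init ≤ c →
      l.foldl step init ≤ c := by
  intro l
  induction l with
  | nil => intro init _ h0; simpa using h0
  | cons y ys ih =>
    intro init h h0
    simpa using ih (step init y) (fun a x hx => h a x (List.mem_cons_of_mem y hx))
      (h init y (List.mem_cons_self ..) h0)

lemma pvFoldl_ge_elem {α : Type} (step : Int → α → Int) (hmono : ∀ a x, a ≤ step a x) :
    ∀ (l : List α) (x : α), x ∈ l → ∀ (v : Int), (∀ a, v ≤ step a x) →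
      ∀ (init : Int), v ≤ l.foldl step init := by
  intro l
  induction l with
  | nil => intro x h; simp at h
  | cons y ys ih =>
    intro x h v hv init
    rcases List.mem_cons.mp h with rfl | hmem
    · simpa using le_trans (hv init) (pvFoldl_ge_init step hmono ys (step init x))
    · simpa using ih x hmem v hv (step init y)

-- the per-pair candidate B computes on diagonal d at lower index i
def pvCand (s : List Char) (n d i : Int) : Int :=
  min (min (pvRd s d (min (n - 1) d) i) (PySem.Int.floordiv (d - i - i + 1) 2)) (n - (d - i))

lemma pvIte_lt_max (a b : Int) : (if a < b then b else a) = max a b := by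
  split <;> omega

-- the comparison B makes through its precomputed comp list is A's pvMatch
lemma pvMatchComp_spec (s : List Char) (i j : Int) :
    pvMatchComp (s.map (fun ch => PySem.Dict.get? pvComplement ch)) s i j = pvMatch s i j := by
  have hdef : (none : Option Char) = PySem.Dict.get? pvComplement ' ' := by decide
  rw [pvMatchComp, pvMatch, hdef, PySem.List.pyGetD_map]

-- fold congruence preserving an invariant of the accumulator
lemma pvFoldl_congr_inv {α : Type} (P : Int → Prop) (f g : Int → α → Int) :
    ∀ (l : List α) (init : Int), P init → (∀ a x, x ∈ l → P a → f a x = g a x) →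
      (∀ a x, P a → P (g a x)) → l.foldl f init = l.foldl g init := by
  intro l
  induction l with
  | nil => intro init _ _ _; rfl
  | cons y ys ih =>
    intro init hP hfg hPg
    have h1 : f init y = g init y := hfg init y (List.mem_cons_self ..) hP
    simp only [List.foldl_cons, h1]
    exact ih (g init y) (hPg init y hP)
      (fun a x hx ha => hfg a x (List.mem_cons_of_mem y hx) ha) hPg

-- B's inner backward diagonal sweep computes the conditional max of pvCand
lemma pvInner_spec (s : List Char) (n d : Int) :
    ∀ (m : Nat) (t b : Int), (t - (max 0 (d - n + 1) - 1)).toNat = m → t ≤ min (n - 1) d →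
    0 ≤ b →
    ((PySem.List.pyRange t (max 0 (d - n + 1) - 1) (-1)).foldl (fun (st : Int × Int) i =>
      if pvMatch s i (d - i) then
        (st.1 + 1,
          if st.2 < st.1 + 1 ∧ i + 4 ≤ d - i then
            (if st.2 < min (min (st.1 + 1) (PySem.Int.floordiv (d - i - i + 1) 2)) (n - (d - i))
             then min (min (st.1 + 1) (PySem.Int.floordiv (d - i - i + 1) 2)) (n - (d - i))
             else st.2)
          else st.2)
      else ((0 : Int), st.2)) ((pvRd s d (min (n - 1) d) (t + 1)), b)).2
      = (PySem.List.pyRange t (max 0 (d - n + 1) - 1) (-1)).foldl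
          (fun acc i => if i + 4 ≤ d - i then max acc (pvCand s n d i) else acc) b := by
  intro m
  induction m with
  | zero =>
    intro t b hm _ _
    rw [PySem.List.pyRange_neg_one_eq_nil (by omega)]
    simp
  | succ m ih =>
    intro t b hm ht hb
    rw [PySem.List.pyRange_neg_one_cons (by omega)]
    simp only [List.foldl_cons]
    have hRdt := pvRd_of_le s d (min (n - 1) d) t ht
    have hRd1 := pvRd_nonneg s d (min (n - 1) d) (t + 1)
    have hcand_le : pvCand s n d t ≤ pvRd s d (min (n - 1) d) t := by
      unfold pvCand; omega
    set b' : Int := if t + 4 ≤ d - t then max b (pvCand s n d t) else b with hb'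
    have hb'0 : 0 ≤ b' := by rw [hb']; split <;> omega
    have hstep : (if pvMatch s t (d - t) then
        (pvRd s d (min (n - 1) d) (t + 1) + 1,
          if b < pvRd s d (min (n - 1) d) (t + 1) + 1 ∧ t + 4 ≤ d - t then
            (if b < min (min (pvRd s d (min (n - 1) d) (t + 1) + 1)
                  (PySem.Int.floordiv (d - t - t + 1) 2)) (n - (d - t))
             then min (min (pvRd s d (min (n - 1) d) (t + 1) + 1)
                  (PySem.Int.floordiv (d - t - t + 1) 2)) (n - (d - t))
             else b)
          else b)
      else ((0 : Int), b)) = (pvRd s d (min (n - 1) d) t, b') := by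
      by_cases hmt : pvMatch s t (d - t) = true
      · rw [if_pos hmt, hRdt, if_pos hmt]
        refine Prod.ext rfl ?_
        rw [hRdt, if_pos hmt] at hcand_le
        have hcand : pvCand s n d t
            = min (min (pvRd s d (min (n - 1) d) (t + 1) + 1)
                (PySem.Int.floordiv (d - t - t + 1) 2)) (n - (d - t)) := by
          unfold pvCand
          rw [hRdt, if_pos hmt]
        rw [hb', ← hcand]
        split
        · rename_i hrun
          rw [if_pos hrun.2, pvIte_lt_max]
        · rename_i hrun
          rcases Decidable.not_and_iff_or_not.mp hrun with h1 | h2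
        -- run ≤ b: the candidate cannot beat b, both sides are b
          · split
            · rw [hcand] at hcand_le; omega
            · rfl
          · rw [if_neg h2]
      · rw [Bool.not_eq_true] at hmt
        rw [if_neg (by simp [hmt]), pvRd_of_not_match s d (min (n - 1) d) t hmt]
        refine Prod.ext rfl ?_
        rw [hb']
        have hz := pvRd_of_not_match s d (min (n - 1) d) t hmt
        rw [hz] at hcand_le
        split
        · have h0 : pvCand s n d t ≤ 0 := hcand_le
          omega
        · rfl
    rw [hstep]
    have harg : t - 1 + 1 = t := by ring
    have := ih (t - 1) b' (by omega) (by omega) hb'0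
    rw [harg] at this
    exact this

-- #### the pair (i, j) is valid when 0 ≤ i, i + 4 ≤ j, j < n; B's candidate equals A's inner loop value
lemma pvCand_eq_val (s : List Char) (n i j : Int) (h0 : 0 ≤ i) (h4 : i + 4 ≤ j) (hj : j < n) :
    pvCand s n (i + j) i = pvWhileK s n i j 0 := by
  have hfd : PySem.Int.floordiv (j - i + 1) 2 = (j - i + 1) / 2 := by
    simp [PySem.Int.floordiv, Int.fdiv_eq_ediv]
  have hmain := pvWhileK_min3 s n i j 0 ((j - i + 1) / 2) h0 hj (by omega)
    (by omega) (by omega) (by omega) (by omega)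
  have harg : i + j - i - i + 1 = j - i + 1 := by ring
  have harg2 : i + (0 : Int) = i := by ring
  rw [harg2] at hmain
  unfold pvCand
  rw [harg, hfd, hmain]
  have harg3 : i + j - i = j := by ring
  rw [harg3]
  omega

-- A's nested fold: lower bound by any valid pair, upper bound from all valid pairs
lemma pvA_ge (s : List Char) (n i j : Int) (h0 : 0 ≤ i) (h4 : i + 4 ≤ j) (hj : j < n) :
    pvWhileK s n i j 0 ≤ (PySem.List.pyRange 0 n 1).foldl (fun maxLen i =>
      (PySem.List.pyRange (i + 4) n 1).foldl (fun acc j =>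
        max acc (pvWhileK s n i j 0)) maxLen) 0 := by
  apply pvFoldl_ge_elem _
    (fun a i => pvFoldl_ge_init (fun acc j => max acc (pvWhileK s n i j 0))
      (fun a x => le_max_left a _) _ a)
    _ i (PySem.List.mem_pyRange_one.mpr ⟨h0, by omega⟩)
  intro a
  exact pvFoldl_ge_elem (fun acc j => max acc (pvWhileK s n i j 0))
    (fun a x => le_max_left a _) _ j
    (PySem.List.mem_pyRange_one.mpr ⟨h4, hj⟩) _ (fun a => le_max_right a _) a

lemma pvA_le (s : List Char) (n x : Int) (hx : 0 ≤ x)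
    (H : ∀ i j, 0 ≤ i → i + 4 ≤ j → j < n → pvWhileK s n i j 0 ≤ x) :
    (PySem.List.pyRange 0 n 1).foldl (fun maxLen i =>
      (PySem.List.pyRange (i + 4) n 1).foldl (fun acc j =>
        max acc (pvWhileK s n i j 0)) maxLen) 0 ≤ x := by
  apply pvFoldl_le _ _ _ _ _ hx
  intro a i hi ha
  have hi' := PySem.List.mem_pyRange_one.mp hi
  apply pvFoldl_le _ _ _ _ _ ha
  intro a' j hj ha'
  have hj' := PySem.List.mem_pyRange_one.mp hj
  exact max_le ha' (H i j hi'.1 hj'.1 hj'.2)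

-- B's rewritten fold (conditional max of pvCand over diagonals): same two bounds
lemma pvB_ge (s : List Char) (n i j : Int) (h0 : 0 ≤ i) (h4 : i + 4 ≤ j) (hj : j < n) :
    pvWhileK s n i j 0 ≤ (PySem.List.pyRange 4 (2 * n - 5) 1).foldl (fun best d =>
      (PySem.List.pyRange (min (n - 1) d) (max 0 (d - n + 1) - 1) (-1)).foldl
        (fun acc i => if i + 4 ≤ d - i then max acc (pvCand s n d i) else acc) best) 0 := by
  have hmono : ∀ (a : Int) (i : Int) (d : Int),
      a ≤ (if i + 4 ≤ d - i then max a (pvCand s n d i) else a) := by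
    intro a i d; split <;> simp
  apply pvFoldl_ge_elem _
    (fun a d => pvFoldl_ge_init _ (fun a i => hmono a i d) _ a)
    _ (i + j) (PySem.List.mem_pyRange_one.mpr ⟨by omega, by omega⟩)
  intro a
  apply pvFoldl_ge_elem _ (fun a i' => hmono a i' (i + j)) _ i
    (PySem.List.mem_pyRange_neg_one.mpr ⟨by omega, by omega⟩)
  intro a'
  have hg : i + 4 ≤ (i + j) - i := by omega
  rw [if_pos hg, pvCand_eq_val s n i j h0 h4 hj]
  exact le_max_right _ _

lemma pvB_le (s : List Char) (n x : Int) (hx : 0 ≤ x)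
    (H : ∀ i j, 0 ≤ i → i + 4 ≤ j → j < n → pvWhileK s n i j 0 ≤ x) :
    (PySem.List.pyRange 4 (2 * n - 5) 1).foldl (fun best d =>
      (PySem.List.pyRange (min (n - 1) d) (max 0 (d - n + 1) - 1) (-1)).foldl
        (fun acc i => if i + 4 ≤ d - i then max acc (pvCand s n d i) else acc) best) 0 ≤ x := by
  apply pvFoldl_le _ _ _ _ _ hx
  intro a d hd ha
  have hd' := PySem.List.mem_pyRange_one.mp hd
  apply pvFoldl_le _ _ _ _ _ ha
  intro a' i hi ha'
  have hi' := PySem.List.mem_pyRange_neg_one.mp hi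
  split
  · rename_i hg
    apply max_le ha'
    have h0 : 0 ≤ i := by omega
    have hjn : d - i < n := by omega
    have := pvCand_eq_val s n i (d - i) h0 hg hjn
    have harg : i + (d - i) = d := by ring
    rw [harg] at this
    rw [this]
    exact H i (d - i) h0 hg hjn
  · exact ha'

-- ===== VERDICT (by name: the statement is the Claim_ definition above) =====
theorem max_self_complement_py_spec : Claim_equal_max_self_complement_py := by
  intro seq _dom
  unfold Spec_max_self_complement_py max_self_complement_py max_self_complement_py_alt
  simp only [pvMatchComp_spec]
  set s := seq.toList with hs
  set n : Int := (s.length : Int) with hn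
  -- rewrite B's nested fold into the conditional-max form
  have hB : (PySem.List.pyRange 4 (2 * n - 5) 1).foldl (fun best d =>
      ((PySem.List.pyRange (min (n - 1) d) (max 0 (d - n + 1) - 1) (-1)).foldl
        (fun (st : Int × Int) i =>
          if pvMatch s i (d - i) then
            (st.1 + 1,
              if st.2 < st.1 + 1 ∧ i + 4 ≤ d - i then
                (if st.2 < min (min (st.1 + 1) (PySem.Int.floordiv (d - i - i + 1) 2)) (n - (d - i))
                 then min (min (st.1 + 1) (PySem.Int.floordiv (d - i - i + 1) 2)) (n - (d - i))
                 else st.2)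
              else st.2)
          else ((0 : Int), st.2)) ((0 : Int), best)).2) 0
      = (PySem.List.pyRange 4 (2 * n - 5) 1).foldl (fun best d =>
        (PySem.List.pyRange (min (n - 1) d) (max 0 (d - n + 1) - 1) (-1)).foldl
          (fun acc i => if i + 4 ≤ d - i then max acc (pvCand s n d i) else acc) best) 0 := by
    apply pvFoldl_congr_inv (fun a => 0 ≤ a) _ _ _ 0 (le_refl 0)
    · intro b d _hd hb
      have hinit : (0 : Int) = pvRd s d (min (n - 1) d) (min (n - 1) d + 1) :=
        (pvRd_of_gt s d (min (n - 1) d) (min (n - 1) d + 1) (by omega)).symm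
      have := pvInner_spec s n d (min (n - 1) d - (max 0 (d - n + 1) - 1)).toNat
        (min (n - 1) d) b rfl (le_refl _) hb
      simp only [← hinit] at this
      exact this
    · intro a d ha
      refine le_trans ha (pvFoldl_ge_init _ ?_ _ a)
      intro a' i
      split
      · exact le_max_left _ _
      · exact le_refl _
  rw [hB]
  -- antisymmetry between the two conditional-max folds
  apply le_antisymm
  · apply pvA_le
    · exact pvFoldl_ge_init _ (fun a d => pvFoldl_ge_init _ (fun a i => by split <;> simp) _ a) _ 0
    · exact fun i j h0 h4 hj => pvB_ge s n i j h0 h4 hj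
  · apply pvB_le
    · exact pvFoldl_ge_init _ (fun a i => pvFoldl_ge_init _ (fun a j => le_max_left a _) _ a) _ 0
    · exact fun i j h0 h4 hj => pvA_ge s n i j h0 h4 hj
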